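-- pv_equiv track=rewrite | github.com/yanjunzan/GMAT | gmat/longwas/common.py | recode_fac_lst
-- ===== SOURCE A (Python) =====
-- def recode_fac_lst(fac_lst):
--     code_val = 0
--     code_dct = {}
--     fac_lst_code = []
--     for i in range(len(fac_lst)):
--         if fac_lst[i] not in code_dct:
--             code_val += 1
--             code_dct[fac_lst[i]] = str(code_val)
--         fac_lst_code.append(code_dct[fac_lst[i]])
--     return fac_lst_code, code_dct
-- ===== SOURCE B (Python) =====
-- def recode_fac_lst(fac_lst):
--     # Rank-by-first-occurrence: a reverse overwrite pass records each element's
--     # first index, distinct elements are sorted by that index, and each element's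
--     # code is its 1-based rank in that order.
--     first = {}
--     for i in range(len(fac_lst) - 1, -1, -1):
--         first[fac_lst[i]] = i
--     code_dct = {x: str(r) for r, x in enumerate(sorted(first, key=first.get), 1)}
--     fac_lst_code = [code_dct[x] for x in fac_lst]
--     return fac_lst_code, code_dct
-- ===== Notes on version B (the rewrite author's own statement) =====
-- stated objective: alternative
-- what changed: Replaces A's single counter-and-membership pass by rank computation: a reverse overwrite pass records each element's first-occurrence index, the distinct elements are sorted by that index, and codes are their 1-based ranks; the list is then mapped through the finished table.
import Mathlib
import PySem

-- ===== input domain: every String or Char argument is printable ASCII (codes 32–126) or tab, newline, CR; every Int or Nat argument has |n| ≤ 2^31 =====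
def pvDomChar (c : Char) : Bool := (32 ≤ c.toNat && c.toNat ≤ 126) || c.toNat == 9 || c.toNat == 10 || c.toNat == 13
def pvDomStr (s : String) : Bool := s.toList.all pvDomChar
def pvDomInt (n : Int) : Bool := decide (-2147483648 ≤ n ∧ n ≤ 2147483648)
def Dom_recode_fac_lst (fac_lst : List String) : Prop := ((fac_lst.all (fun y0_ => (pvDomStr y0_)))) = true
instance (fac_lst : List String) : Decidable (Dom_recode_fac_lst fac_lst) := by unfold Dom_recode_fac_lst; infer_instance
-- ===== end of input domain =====

-- B replaces A's incremental counter-and-membership pass by a rank computation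
-- (reverse first-index pass, sort distinct elements by first index, codes = 1-based
-- ranks, map through the finished table); alternative algorithm, no speed claim.

-- ===== PORT A =====
-- A's loop body: one step of the interleaved "extend dict if new, then append the code" pass.
-- A's 'for i in range(len(fac_lst))' reading fac_lst[i] is the structural fold over fac_lst.
def pvStepA (s : Int × PySem.Dict String String × List String) (x : String) :
    Int × PySem.Dict String String × List String :=
  if s.2.1.contains x then
    (s.1, s.2.1, s.2.2 ++ [s.2.1.getD x ""])
  else
    (s.1 + 1, s.2.1.insert x (PySem.Int.toStr (s.1 + 1)),
     s.2.2 ++ [(s.2.1.insert x (PySem.Int.toStr (s.1 + 1))).getD x ""])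

def recode_fac_lst (fac_lst : List String) : List String × (List (String × String)) :=
  let r := fac_lst.foldl pvStepA (0, PySem.Dict.empty, [])
  (r.2.2, r.2.1.items)

-- ===== PORT B =====
-- B's reverse pass 'for i in range(len(fac_lst)-1, -1, -1): first[fac_lst[i]] = i'.
-- Every i the range produces is a valid index, so pyGetD's default "" is never used.
def pvFirstDict (fac_lst : List String) : PySem.Dict String Int :=
  (PySem.List.pyRange ((fac_lst.length : Int) - 1) (-1) (-1)).foldl
    (fun d i => d.insert (PySem.List.pyGetD fac_lst i "") i) PySem.Dict.empty

def recode_fac_lst_alt (fac_lst : List String) : List String × (List (String × String)) :=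
  let first := pvFirstDict fac_lst
  -- 'sorted(first, key=first.get)': every key is present, so first.get x is the stored index (getD's default unused)
  let order := PySem.List.sorted first.keys (fun x => first.getD x 0) false
  -- '{x: str(r) for r, x in enumerate(order, 1)}'
  let code_dct := (PySem.List.enumerate order 1).foldl
    (fun d p => d.insert p.2 (PySem.Int.toStr p.1)) (PySem.Dict.empty : PySem.Dict String String)
  (fac_lst.map (fun x => code_dct.getD x ""), code_dct.items)

-- ===== PRECONDITION & SPEC =====
def Spec_recode_fac_lst (fac_lst : List String) (out : List String × (List (String × String))) : Prop := out = recode_fac_lst_alt fac_lst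
instance (fac_lst : List String) (out : List String × (List (String × String))) : Decidable (Spec_recode_fac_lst fac_lst out) := by unfold Spec_recode_fac_lst; infer_instance

-- ===== CLAIM (what is proved, stated in full; the proofs are below) =====
def Claim_equal_recode_fac_lst : Prop := ∀ (fac_lst : List String), Dom_recode_fac_lst fac_lst → Spec_recode_fac_lst fac_lst (recode_fac_lst fac_lst)

-- ===== LEMMAS AND PROOFS =====

-- B's reverse pass generalized: the fold over indices n-1, …, k leaves, at each key x,
-- the first index ≥ k where x occurs (the smallest index wins: it is inserted last).
theorem pvFirst_aux (fac_lst : List String) (x : String) :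
    ∀ (m k : Nat) (d : PySem.Dict String Int), fac_lst.length = k + m →
    ((PySem.List.pyRange ((fac_lst.length : Int) - 1) ((k : Int) - 1) (-1)).foldl
      (fun d i => d.insert (PySem.List.pyGetD fac_lst i "") i) d).get? x
    = match PySem.List.index? (fac_lst.drop k) x with
      | some j => some ((k + j : Nat) : Int)
      | none => d.get? x := by
  intro m
  induction m with
  | zero =>
    intro k d hk
    rw [PySem.List.pyRange_neg_one_eq_nil (by omega)]
    rw [List.drop_of_length_le (by omega)]
    simp [PySem.List.index?]
  | succ m ih =>
    intro k d hk
    have hkn : k < fac_lst.length := by omega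
    rw [PySem.List.pyRange_neg_one_eq_reverse]
    have h1 : ((k : Int) - 1) + 1 = (k : Int) := by ring
    have h2 : ((fac_lst.length : Int) - 1) + 1 = (fac_lst.length : Int) := by ring
    rw [h1, h2]
    rw [PySem.List.pyRange_one_cons (by exact_mod_cast hkn)]
    simp only [List.reverse_cons, List.foldl_append, List.foldl_cons, List.foldl_nil]
    have hrev : PySem.List.pyRange ((fac_lst.length : Int) - 1) (((k+1 : Nat) : Int) - 1) (-1)
        = (PySem.List.pyRange ((k : Int) + 1) ((fac_lst.length : Int)) 1).reverse := by
      rw [PySem.List.pyRange_neg_one_eq_reverse]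
      congr 1; push_cast; ring_nf
    rw [← hrev]
    have hget : PySem.List.pyGetD fac_lst (k : Int) "" = fac_lst[k] := by
      rw [PySem.List.pyGetD_natCast]
      simp [List.getD, hkn]
    have hdrop : fac_lst.drop k = fac_lst[k] :: fac_lst.drop (k+1) := by
      exact (List.getElem_cons_drop hkn).symm
    rw [hget, hdrop]
    by_cases hx : x = fac_lst[k]
    · subst hx
      rw [PySem.Dict.get?_insert_self]
      rw [PySem.List.index?_cons_self]
      simp
    · rw [PySem.Dict.get?_insert_of_ne _ _ hx, ih (k+1) d (by omega)]
      rw [PySem.List.index?_cons_of_ne _ (fun h => hx h.symm)]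
      cases hj : PySem.List.index? (fac_lst.drop (k+1)) x with
      | none => simp
      | some j => simp; ring

-- pvFirstDict's lookup is the first-occurrence index.
theorem pvFirst_get? (fac_lst : List String) (x : String) :
    (pvFirstDict fac_lst).get? x = (PySem.List.index? fac_lst x).map (fun j => (j : Int)) := by
  have h := pvFirst_aux fac_lst x fac_lst.length 0 PySem.Dict.empty (by omega)
  simp only [Nat.cast_zero, zero_sub] at h
  unfold pvFirstDict
  rw [h, List.drop_zero]
  cases hj : PySem.List.index? fac_lst x with
  | none => simp
  | some j => simp

theorem pvFirst_keys_nodup (fac_lst : List String) : (pvFirstDict fac_lst).keys.Nodup := by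
  unfold pvFirstDict
  exact PySem.Dict.nodup_keys_foldl_insert_key _ _ _ _ (by simp)

theorem pvFirst_mem_keys (fac_lst : List String) (x : String) :
    x ∈ (pvFirstDict fac_lst).keys ↔ x ∈ fac_lst := by
  rw [← PySem.Dict.contains_iff_mem_keys, PySem.Dict.contains_eq_isSome_get?, pvFirst_get?]
  cases hj : PySem.List.index? fac_lst x with
  | none => simp [(PySem.List.index?_eq_none_iff _ _).mp hj]
  | some j =>
    have : x ∈ fac_lst := (PySem.List.index?_isSome_iff _ _).mp (by rw [hj]; rfl)
    simp [this]

-- dedup is strictly increasing under the first-occurrence index.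
theorem pvDedup_pairwise (xs : List String) :
    (PySem.List.dedup xs).Pairwise
      (fun a b => ((PySem.List.index? xs a).getD 0) < ((PySem.List.index? xs b).getD 0)) := by
  induction xs using List.reverseRecOn with
  | nil => simp [PySem.List.dedup]
  | append_singleton xs x ih =>
    have hd : PySem.List.dedup (xs ++ [x]) = PySem.Set.add (PySem.List.dedup xs) x := by
      simp [PySem.Set.ofList_append_singleton]
    by_cases hx : x ∈ xs
    · rw [hd, PySem.Set.add_of_mem (by rwa [PySem.List.mem_dedup])]
      refine ih.imp_of_mem ?_
      intro a b ha hb hr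
      rw [PySem.List.index?_append_of_mem [x] ((PySem.List.mem_dedup xs a).mp ha),
          PySem.List.index?_append_of_mem [x] ((PySem.List.mem_dedup xs b).mp hb)]
      exact hr
    · rw [hd, PySem.Set.add_of_not_mem (by rwa [PySem.List.mem_dedup])]
      rw [List.pairwise_append]
      refine ⟨?_, by simp, ?_⟩
      · refine ih.imp_of_mem ?_
        intro a b ha hb hr
        rw [PySem.List.index?_append_of_mem [x] ((PySem.List.mem_dedup xs a).mp ha),
            PySem.List.index?_append_of_mem [x] ((PySem.List.mem_dedup xs b).mp hb)]
        exact hr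
      · intro a ha b hb
        rw [List.mem_singleton] at hb; subst hb
        have haxs : a ∈ xs := (PySem.List.mem_dedup xs a).mp ha
        obtain ⟨ja, hja⟩ := Option.isSome_iff_exists.mp ((PySem.List.index?_isSome_iff xs a).mpr haxs)
        have hlt : ja < xs.length := (PySem.List.getElem_of_index?_eq_some hja).fst
        rw [PySem.List.index?_append_of_mem [b] haxs, hja,
            PySem.List.index?_append_singleton_self xs b hx]
        simpa using hlt

theorem pvKey_eq (fac_lst : List String) (a : String) (ja : Nat)
    (hja : PySem.List.index? fac_lst a = some ja) :
    (pvFirstDict fac_lst).getD a 0 = (ja : Int) := by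
  rw [PySem.Dict.getD_eq_get?_getD, pvFirst_get?, hja]
  rfl

-- Sorting the keys by first-occurrence index recovers first-occurrence order.
theorem pvOrder_eq (fac_lst : List String) :
    PySem.List.sorted (pvFirstDict fac_lst).keys (fun x => (pvFirstDict fac_lst).getD x 0) false
      = PySem.List.dedup fac_lst := by
  apply PySem.List.sorted_eq_of_perm_of_pairwise_lt
  · rw [List.perm_ext_iff_of_nodup (PySem.List.nodup_dedup fac_lst) (pvFirst_keys_nodup fac_lst)]
    intro a
    rw [PySem.List.mem_dedup, pvFirst_mem_keys]
  · refine (pvDedup_pairwise fac_lst).imp_of_mem ?_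
    intro a b ha hb hr
    have haxs : a ∈ fac_lst := (PySem.List.mem_dedup fac_lst a).mp ha
    have hbxs : b ∈ fac_lst := (PySem.List.mem_dedup fac_lst b).mp hb
    obtain ⟨ja, hja⟩ := Option.isSome_iff_exists.mp ((PySem.List.index?_isSome_iff fac_lst a).mpr haxs)
    obtain ⟨jb, hjb⟩ := Option.isSome_iff_exists.mp ((PySem.List.index?_isSome_iff fac_lst b).mpr hbxs)
    rw [hja, hjb] at hr
    simp only [Option.getD_some] at hr
    rw [pvKey_eq fac_lst a ja hja, pvKey_eq fac_lst b jb hjb]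
    exact_mod_cast hr

-- The canonical code table: dedup in first-occurrence order, codes = 1-based ranks.
def pvRank (xs : List String) : List (String × String) :=
  (PySem.List.enumerate (PySem.List.dedup xs) 1).map (fun p => (p.2, PySem.Int.toStr p.1))

-- Proof-side: the table-only part of A's loop state.
def pvTab (s : Int × PySem.Dict String String) (x : String) :
    Int × PySem.Dict String String :=
  if s.2.contains x then s else (s.1 + 1, s.2.insert x (PySem.Int.toStr (s.1 + 1)))

-- A's table fold computes (number of distinct elements, the canonical table).
theorem pvTab_spec (xs : List String) :
    (xs.foldl pvTab (0, PySem.Dict.empty)).1 = ((PySem.List.dedup xs).length : Int) ∧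
    ((xs.foldl pvTab (0, PySem.Dict.empty)).2).items = pvRank xs := by
  induction xs using List.reverseRecOn with
  | nil => exact ⟨by decide, rfl⟩
  | append_singleton xs x ih =>
    rw [List.foldl_append, List.foldl_cons, List.foldl_nil]
    have hkeys : ((xs.foldl pvTab (0, PySem.Dict.empty)).2).keys = PySem.List.dedup xs := by
      simp only [PySem.Dict.keys, ih.2, pvRank, List.map_map, Function.comp_def]
      exact PySem.List.map_snd_enumerate _ _
    have hd : PySem.List.dedup (xs ++ [x]) = PySem.Set.add (PySem.List.dedup xs) x := by
      simp [PySem.Set.ofList_append_singleton]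
    by_cases hx : x ∈ xs
    · have hc : ((xs.foldl pvTab (0, PySem.Dict.empty)).2).contains x = true := by
        rw [PySem.Dict.contains_eq_decide_mem_keys, hkeys]
        simp [hx]
      have hded : PySem.List.dedup (xs ++ [x]) = PySem.List.dedup xs := by
        rw [hd, PySem.Set.add_of_mem (by rwa [PySem.List.mem_dedup])]
      rw [pvTab, hc, if_pos rfl]
      refine ⟨?_, ?_⟩
      · rw [ih.1, hded]
      · rw [ih.2, show pvRank (xs ++ [x]) = pvRank xs from by unfold pvRank; rw [hded]]
    · have hc : ((xs.foldl pvTab (0, PySem.Dict.empty)).2).contains x = false := by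
        rw [PySem.Dict.contains_eq_decide_mem_keys, hkeys]
        simp [hx]
      rw [pvTab, hc]
      simp only [Bool.false_eq_true, if_false]
      have hded : PySem.List.dedup (xs ++ [x]) = PySem.List.dedup xs ++ [x] := by
        rw [hd, PySem.Set.add_of_not_mem (by rwa [PySem.List.mem_dedup])]
      refine ⟨?_, ?_⟩
      · rw [ih.1, hded]; simp
      · rw [PySem.Dict.items_insert_of_not_contains _ _ hc, ih.2]
        unfold pvRank
        rw [hded, PySem.List.enumerate_append, List.map_append, ih.1]
        simp [PySem.List.enumerate, Int.add_comm]

-- B's comprehension over dedup builds exactly the canonical table.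
theorem pvCode_items (fac_lst : List String) :
    (((PySem.List.enumerate (PySem.List.dedup fac_lst) 1).foldl
      (fun d p => d.insert p.2 (PySem.Int.toStr p.1))
      (PySem.Dict.empty : PySem.Dict String String))).items = pvRank fac_lst := by
  have h := PySem.Dict.items_foldl_insert_fresh (PySem.List.enumerate (PySem.List.dedup fac_lst) 1)
      (fun p => p.2) (fun p => PySem.Int.toStr p.1) PySem.Dict.empty
      (fun a _ => rfl) (by rw [PySem.List.map_snd_enumerate]; exact PySem.List.nodup_dedup fac_lst)
  simpa [pvRank] using h

-- A's table fold never overwrites an existing entry: lookups of present keys are stable.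
theorem pvTab_mono (xs : List String) : ∀ (cv : Int) (d : PySem.Dict String String)
    (k v : String), d.get? k = some v → ((xs.foldl pvTab (cv, d)).2).get? k = some v := by
  induction xs with
  | nil => intro cv d k v h; simpa using h
  | cons x xs ih =>
    intro cv d k v h
    simp only [List.foldl, pvTab]
    by_cases hc : d.contains x
    · simpa [hc] using ih cv d k v h
    · simp only [hc]
      apply ih
      rw [PySem.Dict.get?_insert]
      have hk : ¬ k = x := by
        intro hkx; subst hkx
        rw [PySem.Dict.contains_eq_isSome_get?, h] at hc
        simp at hc
      simp [hk, h]

-- A's interleaved fold = the table fold plus the output mapped through the FINAL table.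
theorem pvFold_eq (xs : List String) : ∀ (cv : Int) (d : PySem.Dict String String)
    (out : List String),
    xs.foldl pvStepA (cv, d, out)
      = ((xs.foldl pvTab (cv, d)).1, (xs.foldl pvTab (cv, d)).2,
         out ++ xs.map (fun x => ((xs.foldl pvTab (cv, d)).2).getD x "")) := by
  induction xs with
  | nil => intro cv d out; simp
  | cons x xs ih =>
    intro cv d out
    simp only [List.foldl, List.map, pvStepA, pvTab]
    by_cases hc : d.contains x
    · simp only [hc, if_true]
      rw [ih cv d (out ++ [d.getD x ""])]
      obtain ⟨v, hv⟩ : ∃ v, d.get? x = some v := by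
        rw [PySem.Dict.contains_eq_isSome_get?] at hc
        exact Option.isSome_iff_exists.mp hc
      have hfin := pvTab_mono xs cv d x v hv
      have hx : ((xs.foldl pvTab (cv, d)).2).getD x "" = d.getD x "" := by
        rw [PySem.Dict.getD_eq_get?_getD, hfin, PySem.Dict.getD_eq_get?_getD, hv]
      simp [hx]
    · simp only [hc]
      rw [ih]
      have hself : (d.insert x (PySem.Int.toStr (cv + 1))).get? x = some (PySem.Int.toStr (cv + 1)) :=
        PySem.Dict.get?_insert_self _ _ _
      have hfin := pvTab_mono xs (cv + 1) (d.insert x (PySem.Int.toStr (cv + 1))) x _ hself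
      have hx : ((xs.foldl pvTab (cv + 1, d.insert x (PySem.Int.toStr (cv + 1)))).2).getD x ""
          = (d.insert x (PySem.Int.toStr (cv + 1))).getD x "" := by
        rw [PySem.Dict.getD_eq_get?_getD, hfin, PySem.Dict.getD_eq_get?_getD, hself]
      simp [hx]

-- ===== VERDICT (by name: the statement is the Claim_ definition above) =====
theorem recode_fac_lst_spec : Claim_equal_recode_fac_lst := by
  intro fac_lst _
  unfold Spec_recode_fac_lst
  simp only [recode_fac_lst, recode_fac_lst_alt]
  rw [pvFold_eq, pvOrder_eq]
  have hC : ((PySem.List.enumerate (PySem.List.dedup fac_lst) 1).foldl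
      (fun d p => d.insert p.2 (PySem.Int.toStr p.1))
      (PySem.Dict.empty : PySem.Dict String String))
      = (fac_lst.foldl pvTab (0, PySem.Dict.empty)).2 :=
    PySem.Dict.ext (by rw [pvCode_items, (pvTab_spec fac_lst).2])
  rw [hC]
  simp
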